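-- pv_equiv track=rewrite | github.com/paulauus/Advent-of-Code | 2015/day_5.py | has_three_vowels
-- ===== SOURCE A (Python) =====
-- def has_three_vowels(s):
--     """Checks the string has three vowels."""
--     vowels = "aeiou"
--     vowel_count = 0
--     for letter in s:
--         if letter in vowels:
--             vowel_count += 1
--     if vowel_count >= 3:
--         return True
--
--     return False
-- ===== SOURCE B (Python) =====
-- def has_three_vowels(s):
--     """Checks the string has three vowels."""
--     return sum(s.count(v) for v in "aeiou") >= 3
-- ===== Notes on version B (the rewrite author's own statement) =====
-- stated objective: idiomatic
-- what changed: Instead of scanning the string once with a running counter and a per-character membership test, B iterates over the fixed vowel alphabet, counts each vowel's occurrences with s.count (a C-level scan), sums the five counts and compares the total to 3 in one expression.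
import Mathlib
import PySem

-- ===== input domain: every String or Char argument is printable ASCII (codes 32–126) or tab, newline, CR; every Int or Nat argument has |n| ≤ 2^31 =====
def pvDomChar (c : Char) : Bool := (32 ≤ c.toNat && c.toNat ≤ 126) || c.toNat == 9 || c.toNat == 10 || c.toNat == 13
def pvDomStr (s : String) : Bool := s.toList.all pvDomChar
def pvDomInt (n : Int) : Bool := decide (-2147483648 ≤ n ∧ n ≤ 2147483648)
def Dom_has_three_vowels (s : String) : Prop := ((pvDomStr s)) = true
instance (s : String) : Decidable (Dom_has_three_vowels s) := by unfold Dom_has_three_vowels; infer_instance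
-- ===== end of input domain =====

-- B iterates over the fixed vowel alphabet summing per-vowel substring counts, instead of A's single scan with a running counter (idiomatic one-liner).


-- ===== PORT A =====
-- literal port: scan s, test 'letter in vowels' (substring test of the 1-char string), count, then compare
def has_three_vowels (s : String) : Bool :=
  let vowels : String := "aeiou"
  let vowel_count : Int :=
    s.toList.foldl (fun acc letter =>
      if PySem.Chars.isIn [letter] vowels.toList then acc + 1 else acc) 0
  if 3 ≤ vowel_count then true else false

-- ===== PORT B =====
-- literal port of Source B: sum(s.count(v) for v in "aeiou") >= 3
def has_three_vowels_alt (s : String) : Bool :=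
  decide (3 ≤ (("aeiou".toList.map (fun v => (PySem.Chars.count s.toList [v] : Int))).sum))

-- ===== PRECONDITION & SPEC =====
def Spec_has_three_vowels (s : String) (out : Bool) : Prop := out = has_three_vowels_alt s
instance (s : String) (out : Bool) : Decidable (Spec_has_three_vowels s out) := by unfold Spec_has_three_vowels; infer_instance

-- ===== CLAIM (what is proved, stated in full; the proofs are below) =====
def Claim_equal_has_three_vowels : Prop := ∀ (s : String), Dom_has_three_vowels s → Spec_has_three_vowels s (has_three_vowels s)

-- ===== LEMMAS AND PROOFS =====

-- count.go with a single-char needle and enough fuel counts occurrences of that char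
theorem pv_go_single (c : Char) : ∀ (fuel : Nat) (l : List Char) (acc : Nat), l.length ≤ fuel →
    PySem.Chars.count.go [c] fuel l acc = acc + l.count c := by
  intro fuel
  induction fuel with
  | zero =>
    intro l acc h
    have : l = [] := List.eq_nil_of_length_eq_zero (Nat.le_zero.mp h)
    subst this; simp [PySem.Chars.count.go]
  | succ n ih =>
    intro l acc h
    cases l with
    | nil => simp [PySem.Chars.count.go]
    | cons a t =>
      simp only [PySem.Chars.count.go]
      by_cases hc : a = c
      · simp [List.isPrefixOf, hc, ih t (acc + 1) (by simpa using h)]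
        omega
      · simp [List.isPrefixOf, hc, Ne.symm hc, ih t acc (by simpa using h)]

-- Python s.count(c) for a single character equals the element count
theorem pv_count_singleton (l : List Char) (c : Char) :
    PySem.Chars.count l [c] = l.count c := by
  simp [PySem.Chars.count, pv_go_single c l.length l 0 le_rfl]

-- '1-char string in vowels' is just char membership
theorem pv_isIn_singleton (c : Char) (l : List Char) :
    PySem.Chars.isIn [c] l = decide (c ∈ l) := by
  rcases h : PySem.Chars.isIn [c] l with _ | _
  · have := (PySem.Chars.isIn_eq_false_iff _ _).mp h
    simp [List.singleton_infix_iff] at this; simp [this]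
  · have := (PySem.Chars.isIn_iff_infix _ _).mp h
    simp [List.singleton_infix_iff] at this; simp [this]

-- one more character at the front adds its count over the alphabet
theorem pv_sum_counts_cons (a : Char) (t : List Char) : ∀ (vs : List Char),
    (vs.map (fun v => (a :: t).count v)).sum = (vs.map (fun v => t.count v)).sum + vs.count a := by
  intro vs
  induction vs with
  | nil => simp
  | cons b bs ih =>
    simp only [List.map_cons, List.sum_cons]
    rw [ih]
    simp only [List.count_cons]
    by_cases h : a = b
    · subst h; simp; omega
    · simp [h, Ne.symm h]; omega

-- summing per-vowel counts over a duplicate-free alphabet equals one membership count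
theorem pv_sum_counts (vs : List Char) (hn : vs.Nodup) : ∀ (l : List Char),
    (vs.map (fun v => l.count v)).sum = l.countP (fun c => decide (c ∈ vs)) := by
  intro l
  induction l with
  | nil => simp
  | cons a t ih =>
    rw [pv_sum_counts_cons, List.countP_cons, ih]
    by_cases ha : a ∈ vs
    · simp [ha, List.count_eq_one_of_mem hn ha]
    · simp [ha, List.count_eq_zero_of_not_mem ha]

-- ===== VERDICT (by name: the statement is the Claim_ definition above) =====
theorem has_three_vowels_spec : Claim_equal_has_three_vowels := by
  intro s _
  unfold Spec_has_three_vowels has_three_vowels has_three_vowels_alt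
  simp only [pv_count_singleton, pv_isIn_singleton, PySem.List.foldl_if_add_one]
  have hs : (("aeiou".toList.map (fun v => (s.toList.count v : Int))).sum)
      = ((s.toList.countP (fun c => decide (c ∈ "aeiou".toList)) : Nat) : Int) := by
    rw [← pv_sum_counts "aeiou".toList (by decide) s.toList]
    simp
  rw [hs, zero_add]
  by_cases h : (3 : Int) ≤ (s.toList.countP (fun c => decide (c ∈ "aeiou".toList)) : Int)
  · simp only [if_pos h, decide_eq_true h]
  · simp only [if_neg h, decide_eq_false h]
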